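-- pv_equiv track=rewrite | github.com/eharo010/pythonProject | SrDesignFinal.py | AddTrailingZeros
-- ===== SOURCE A (Python) =====
-- def AddTrailingZeros(myStr):
--     tmpA = myStr[myStr.find('.') + len('.'):]
--     cnt = 0
--
--     while not (len(tmpA) >= 6):
--         tmpA = tmpA + '0'
--         cnt = cnt + 1
--     for i in range(cnt):
--         myStr = myStr + '0'
--
--     return myStr
-- ===== SOURCE B (Python) =====
-- def AddTrailingZeros(myStr):
--     frac = myStr[myStr.find('.') + 1:]
--     pad = 6 - len(frac)
--     if pad > 0:
--         myStr = myStr + '0' * pad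
--     return myStr
-- ===== Notes on version B (the rewrite author's own statement) =====
-- stated objective: simpler
-- what changed: Replaces A's two loops (a while loop counting missing digits one by one, then a for loop appending a zero per iteration) with a closed-form pad count 6 - len(frac) and a single bulk string-repetition append.
import Mathlib
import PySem

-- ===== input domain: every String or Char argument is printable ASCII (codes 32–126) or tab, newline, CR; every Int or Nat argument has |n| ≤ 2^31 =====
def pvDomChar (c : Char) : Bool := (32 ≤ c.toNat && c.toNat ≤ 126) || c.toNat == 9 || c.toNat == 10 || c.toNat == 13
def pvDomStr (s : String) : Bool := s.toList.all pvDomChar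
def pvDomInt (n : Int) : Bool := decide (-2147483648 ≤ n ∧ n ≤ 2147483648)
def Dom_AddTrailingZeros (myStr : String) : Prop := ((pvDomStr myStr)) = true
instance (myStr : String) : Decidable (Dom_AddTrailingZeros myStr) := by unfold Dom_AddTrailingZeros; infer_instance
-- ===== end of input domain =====

-- B replaces A's two loops (count missing digits one by one, then append zeros one by one)
-- with the closed form pad = 6 - len(frac) and a single bulk append (objective: simpler).

-- ===== PORT A =====
-- A's while loop: pads tmpA with '0' until its length is ≥ 6, counting the steps in cnt
def pvWhileA (tmpA : List Char) (cnt : Int) : Int :=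
  if tmpA.length ≥ 6 then cnt
  else pvWhileA (tmpA ++ ['0']) (cnt + 1)
termination_by 6 - tmpA.length
decreasing_by simp at *; omega

def AddTrailingZeros (myStr : String) : String :=
  let tmpA := PySem.Str.slice myStr (some (PySem.Str.find myStr "." + 1)) none
  let cnt := pvWhileA tmpA.toList 0
  (PySem.List.pyRange 0 cnt 1).foldl (fun s _ => s ++ "0") myStr

-- ===== PORT B =====
def AddTrailingZeros_alt (myStr : String) : String :=
  let frac := PySem.Str.slice myStr (some (PySem.Str.find myStr "." + 1)) none
  let pad : Int := 6 - PySem.Str.len frac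
  if pad > 0 then myStr ++ String.ofList (List.replicate pad.toNat '0') else myStr

-- ===== PRECONDITION & SPEC =====
def Spec_AddTrailingZeros (myStr : String) (out : String) : Prop := out = AddTrailingZeros_alt myStr
instance (myStr : String) (out : String) : Decidable (Spec_AddTrailingZeros myStr out) := by unfold Spec_AddTrailingZeros; infer_instance

-- ===== CLAIM (what is proved, stated in full; the proofs are below) =====
def Claim_equal_AddTrailingZeros : Prop := ∀ (myStr : String), Dom_AddTrailingZeros myStr → Spec_AddTrailingZeros myStr (AddTrailingZeros myStr)

-- ===== LEMMAS AND PROOFS =====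

-- A's while loop computes cnt + max(0, 6 - len tmpA)
theorem pvWhileA_eq (tmpA : List Char) (cnt : Int) :
    pvWhileA tmpA cnt = cnt + ((6 - tmpA.length : Nat) : Int) := by
  fun_induction pvWhileA tmpA cnt with
  | case1 tmpA cnt h =>
    have : (6 - tmpA.length) = 0 := by omega
    simp [this]
  | case2 tmpA cnt h ih =>
    simp at h
    simp [ih]
    omega

-- A's for loop appends its m zeros in one block
theorem foldl_zeros (m : Nat) (init : String) :
    (PySem.List.pyRange 0 (m : Int) 1).foldl (fun s _ => s ++ "0") init
      = init ++ String.ofList (List.replicate m '0') := by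
  induction m generalizing init with
  | zero =>
    apply String.toList_injective
    simp
  | succ n ih =>
    rw [show ((n + 1 : Nat) : Int) = (n : Int) + 1 by push_cast; ring,
        PySem.List.pyRange_one_succ_right (by positivity), List.foldl_append, ih]
    apply String.toList_injective
    simp [List.replicate_succ']

theorem AddTrailingZeros_eq_alt (myStr : String) :
    AddTrailingZeros myStr = AddTrailingZeros_alt myStr := by
  show (PySem.List.pyRange 0 (pvWhileA (PySem.Str.slice myStr (some (PySem.Str.find myStr "." + 1)) none).toList 0) 1).foldl
        (fun s _ => s ++ "0") myStr = _
  rw [pvWhileA_eq, zero_add, foldl_zeros]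
  show _ = (if (6 : Int) - PySem.Str.len (PySem.Str.slice myStr (some (PySem.Str.find myStr "." + 1)) none) > 0 then _ else _)
  rw [PySem.Str.len_eq]
  set L := (PySem.Str.slice myStr (some (PySem.Str.find myStr "." + 1)) none).toList with hL
  clear_value L
  by_cases h : (6 : Int) - L.length > 0
  · rw [if_pos h]
    have : ((6 : Int) - L.length).toNat = 6 - L.length := by omega
    rw [this]
  · rw [if_neg h]
    have : 6 - L.length = 0 := by omega
    rw [this]
    apply String.toList_injective
    simp

-- ===== VERDICT (by name: the statement is the Claim_ definition above) =====
theorem AddTrailingZeros_spec : Claim_equal_AddTrailingZeros := by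
  intro myStr _
  exact AddTrailingZeros_eq_alt myStr
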